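-- pv_equiv track=rewrite | github.com/skmprabhu252/nfs-benchmark-suite | lib/report_generators/templates.py | get_insights_grid_html
-- ===== SOURCE A (Python) =====
-- from typing import Dict, Any, List
--
-- def get_insights_grid_html(insights: List[Dict[str, Any]], report_style: str) -> str:
--     """
--     Generate insights grid with cards.
--
--     Args:
--         insights: List of insight dictionaries
--         report_style: Report style for context
--
--     Returns:
--         Insights grid HTML
--     """
--     if not insights:
--         return '<p class="no-analysis">No insights generated.</p>'
--
--     # Sort insights by severity: critical, warning, info
--     severity_order = {'critical': 0, 'warning': 1, 'info': 2}
--     sorted_insights = sorted(insights, key=lambda x: severity_order.get(x.get('severity', 'info'), 3))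
--
--     cards_html = []
--     for insight in sorted_insights:
--         severity = insight.get('severity', 'info')
--         title = insight.get('title', 'Insight')
--         description = insight.get('description', '')
--         recommendation = insight.get('recommendation', '')
--
--         # Add emoji based on severity
--         emoji = {'critical': '🚨', 'warning': '⚠️', 'info': 'ℹ️'}.get(severity, 'ℹ️')
--
--         recommendation_html = ''
--         if recommendation:
--             recommendation_html = f'<div class="insight-recommendation">{recommendation}</div>'
--
--         card_html = f"""
--         <div class="insight-card {severity}">
--             <h4>{emoji} {severity.title()}: {title}</h4>
--             <p>{description}</p>
--             {recommendation_html}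
--         </div>
--         """
--         cards_html.append(card_html)
--
--     return f'<div class="insights-grid">{"".join(cards_html)}</div>'
-- ===== SOURCE B (Python) =====
-- def _card(insight):
--     sev = insight.get('severity', 'info')
--     if sev == 'critical':
--         emoji = '\U0001F6A8'
--     elif sev == 'warning':
--         emoji = '\u26A0\uFE0F'
--     else:
--         emoji = '\u2139\uFE0F'
--     rec = insight.get('recommendation', '')
--     rec_html = f'<div class="insight-recommendation">{rec}</div>' if rec else ''
--     return ('\n        <div class="insight-card ' + sev + '">\n            <h4>'
--             + emoji + ' ' + sev.title() + ': ' + insight.get('title', 'Insight')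
--             + '</h4>\n            <p>' + insight.get('description', '')
--             + '</p>\n            ' + rec_html + '\n        </div>\n        ')
--
--
-- def get_insights_grid_html(insights, report_style):
--     if not insights:
--         return '<p class="no-analysis">No insights generated.</p>'
--     crit, warn, info, other = [], [], [], []
--     for ins in insights:
--         sev = ins.get('severity', 'info')
--         if sev == 'critical':
--             crit.append(ins)
--         elif sev == 'warning':
--             warn.append(ins)
--         elif sev == 'info':
--             info.append(ins)
--         else:
--             other.append(ins)
--     html = '<div class="insights-grid">'
--     for bucket in (crit, warn, info, other):
--         for ins in bucket:
--             html += _card(ins)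
--     return html + '</div>'
-- ===== Notes on version B (the rewrite author's own statement) =====
-- stated objective: alternative
-- what changed: Replaces the comparison sort by severity key with a single-pass partition into four ordered buckets (critical/warning/info/other) emitted in order, and builds the HTML by direct string accumulation via a card helper instead of a list of cards joined at the end.
import Mathlib
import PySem

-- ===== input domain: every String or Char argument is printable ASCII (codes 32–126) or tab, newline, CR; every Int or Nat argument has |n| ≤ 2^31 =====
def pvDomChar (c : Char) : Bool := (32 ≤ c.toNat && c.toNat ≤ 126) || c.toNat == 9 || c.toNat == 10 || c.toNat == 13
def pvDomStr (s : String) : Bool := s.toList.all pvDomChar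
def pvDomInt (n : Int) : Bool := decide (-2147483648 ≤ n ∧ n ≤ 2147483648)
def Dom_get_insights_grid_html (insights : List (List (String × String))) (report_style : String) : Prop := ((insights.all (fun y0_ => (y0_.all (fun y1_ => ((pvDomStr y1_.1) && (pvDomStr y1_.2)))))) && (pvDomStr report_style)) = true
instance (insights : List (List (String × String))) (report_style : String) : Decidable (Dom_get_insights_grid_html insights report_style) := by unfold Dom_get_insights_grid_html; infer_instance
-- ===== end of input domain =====

-- B replaces A's stable sort by severity with a single-pass four-bucket partition
-- (critical/warning/info/other) emitted in order; same per-card formatting, same output.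


-- Shared port of Python's str.title() (PySem has no title); exact on the ASCII domain:
-- a letter is uppercased when the previous character is not a letter, lowercased otherwise.
def pyTitleAux : List Char → Bool → List Char
  | [], _ => []
  | c :: cs, prevCased =>
    (if PySem.Chars.isalpha c then
      (if prevCased then PySem.Chars.lowerChar c else PySem.Chars.upperChar c)
     else c) :: pyTitleAux cs (PySem.Chars.isalpha c)

def pyTitle (s : String) : String := String.ofList (pyTitleAux s.toList false)

-- ===== PORT A =====
def get_insights_grid_html (insights : List (List (String × String))) (report_style : String) : String :=
  if insights = [] then "<p class=\"no-analysis\">No insights generated.</p>"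
  else
    let severity_order : PySem.Dict String Int :=
      PySem.Dict.mk [("critical", 0), ("warning", 1), ("info", 2)]
    let sorted_insights :=
      PySem.List.sorted insights
        (fun x => severity_order.getD ((PySem.Dict.mk x).getD "severity" "info") 3) false
    let cards_html := sorted_insights.foldl (fun acc insight =>
      let severity := (PySem.Dict.mk insight).getD "severity" "info"
      let title := (PySem.Dict.mk insight).getD "title" "Insight"
      let description := (PySem.Dict.mk insight).getD "description" ""
      let recommendation := (PySem.Dict.mk insight).getD "recommendation" ""
      let emoji := (PySem.Dict.mk [("critical", "🚨"), ("warning", "⚠️"), ("info", "ℹ️")]).getD severity "ℹ️"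
      let recommendation_html :=
        if recommendation ≠ "" then
          "<div class=\"insight-recommendation\">" ++ recommendation ++ "</div>"
        else ""
      let card_html :=
        "\n        <div class=\"insight-card " ++ severity ++ "\">\n            <h4>" ++
        emoji ++ " " ++ pyTitle severity ++ ": " ++ title ++ "</h4>\n            <p>" ++
        description ++ "</p>\n            " ++ recommendation_html ++ "\n        </div>\n        "
      acc ++ [card_html]) []
    "<div class=\"insights-grid\">" ++ PySem.Str.join "" cards_html ++ "</div>"

-- ===== PORT B =====
def pvCard (insight : List (String × String)) : String :=
  let sev := (PySem.Dict.mk insight).getD "severity" "info"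
  let emoji := if sev = "critical" then "🚨" else if sev = "warning" then "⚠️" else "ℹ️"
  let rec_ := (PySem.Dict.mk insight).getD "recommendation" ""
  let rec_html :=
    if rec_ ≠ "" then "<div class=\"insight-recommendation\">" ++ rec_ ++ "</div>" else ""
  "\n        <div class=\"insight-card " ++ sev ++ "\">\n            <h4>" ++
  emoji ++ " " ++ pyTitle sev ++ ": " ++ (PySem.Dict.mk insight).getD "title" "Insight" ++
  "</h4>\n            <p>" ++ (PySem.Dict.mk insight).getD "description" "" ++
  "</p>\n            " ++ rec_html ++ "\n        </div>\n        "

def pvBuckets (insights : List (List (String × String))) :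
    List (List (String × String)) × List (List (String × String)) ×
    List (List (String × String)) × List (List (String × String)) :=
  insights.foldl (fun b ins =>
    let sev := (PySem.Dict.mk ins).getD "severity" "info"
    if sev = "critical" then (b.1 ++ [ins], b.2.1, b.2.2.1, b.2.2.2)
    else if sev = "warning" then (b.1, b.2.1 ++ [ins], b.2.2.1, b.2.2.2)
    else if sev = "info" then (b.1, b.2.1, b.2.2.1 ++ [ins], b.2.2.2)
    else (b.1, b.2.1, b.2.2.1, b.2.2.2 ++ [ins])) ([], [], [], [])

def get_insights_grid_html_alt (insights : List (List (String × String))) (report_style : String) : String :=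
  if insights = [] then "<p class=\"no-analysis\">No insights generated.</p>"
  else
    let b := pvBuckets insights
    let html := "<div class=\"insights-grid\">"
    let html := b.1.foldl (fun s ins => s ++ pvCard ins) html
    let html := b.2.1.foldl (fun s ins => s ++ pvCard ins) html
    let html := b.2.2.1.foldl (fun s ins => s ++ pvCard ins) html
    let html := b.2.2.2.foldl (fun s ins => s ++ pvCard ins) html
    html ++ "</div>"

-- ===== PRECONDITION & SPEC =====
def Spec_get_insights_grid_html (insights : List (List (String × String))) (report_style : String) (out : String) : Prop := out = get_insights_grid_html_alt insights report_style
instance (insights : List (List (String × String))) (report_style : String) (out : String) : Decidable (Spec_get_insights_grid_html insights report_style out) := by unfold Spec_get_insights_grid_html; infer_instance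

-- ===== CLAIM (what is proved, stated in full; the proofs are below) =====
def Claim_equal_get_insights_grid_html : Prop := ∀ (insights : List (List (String × String))) (report_style : String), Dom_get_insights_grid_html insights report_style → Spec_get_insights_grid_html insights report_style (get_insights_grid_html insights report_style)

-- ===== LEMMAS AND PROOFS =====

-- the severity string of an insight, and A's integer sort key
def pvSev (ins : List (String × String)) : String := (PySem.Dict.mk ins).getD "severity" "info"

def pvKey (ins : List (String × String)) : Int :=
  (PySem.Dict.mk [("critical", (0 : Int)), ("warning", 1), ("info", 2)]).getD (pvSev ins) 3

-- concatenation of a list of strings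
def pvSj (l : List String) : String := l.foldr (· ++ ·) ""

lemma pvKey_eq (ins : List (String × String)) :
    pvKey ins = if pvSev ins = "critical" then 0 else if pvSev ins = "warning" then 1
      else if pvSev ins = "info" then 2 else 3 := by
  unfold pvKey
  generalize pvSev ins = s
  split_ifs with h1 h2 h3
  · subst h1; decide
  · subst h2; decide
  · subst h3; decide
  · have e1 : ("critical" == s) = false := by simp [Ne.symm h1]
    have e2 : ("warning" == s) = false := by simp [Ne.symm h2]
    have e3 : ("info" == s) = false := by simp [Ne.symm h3]
    simp [PySem.Dict.getD_eq_get?_getD, PySem.Dict.get?_mk_cons, e1, e2, e3, PySem.Dict.get?]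

lemma pvKey_mem (ins : List (String × String)) :
    pvKey ins = 0 ∨ pvKey ins = 1 ∨ pvKey ins = 2 ∨ pvKey ins = 3 := by
  rw [pvKey_eq]; split_ifs <;> simp

lemma pvEmoji_eq (s : String) :
    (PySem.Dict.mk [("critical", "🚨"), ("warning", "⚠️"), ("info", "ℹ️")]).getD s "ℹ️" =
      if s = "critical" then "🚨" else if s = "warning" then "⚠️" else "ℹ️" := by
  split_ifs with h1 h2
  · subst h1; decide
  · subst h2; decide
  · have e1 : ("critical" == s) = false := by simp [Ne.symm h1]
    have e2 : ("warning" == s) = false := by simp [Ne.symm h2]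
    by_cases h3 : s = "info"
    · subst h3; decide
    · have e3 : ("info" == s) = false := by simp [Ne.symm h3]
      simp [PySem.Dict.getD_eq_get?_getD, PySem.Dict.get?_mk_cons, e1, e2, e3, PySem.Dict.get?]

-- insertBy facts
lemma insertBy_append_left {α : Type} (before : α → α → Bool) (x : α) (l r : List α)
    (h : ∀ y ∈ l, before x y = false) :
    PySem.List.insertBy before x (l ++ r) = l ++ PySem.List.insertBy before x r := by
  induction l with
  | nil => rfl
  | cons a t ih =>
    have ha := h a (by simp)
    have ht : ∀ y ∈ t, before x y = false := fun y hy => h y (by simp [hy])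
    simp [PySem.List.insertBy, ha, ih ht]

lemma insertBy_all_before {α : Type} (before : α → α → Bool) (x : α) (ys : List α)
    (h : ∀ y ∈ ys, before x y = true) :
    PySem.List.insertBy before x ys = x :: ys := by
  cases ys with
  | nil => rfl
  | cons a t => simp [PySem.List.insertBy, h a (by simp)]

-- the stable insertion sort by a 4-valued key is the concatenation of the four filters
lemma sorted_buckets (xs : List (List (String × String)))
    (c0 c1 c2 c3 : List (List (String × String)))
    (h0 : ∀ y ∈ c0, pvKey y = 0) (h1 : ∀ y ∈ c1, pvKey y = 1)
    (h2 : ∀ y ∈ c2, pvKey y = 2) (h3 : ∀ y ∈ c3, pvKey y = 3) :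
    xs.foldl (fun acc x => PySem.List.insertBy (fun a b => decide (pvKey a < pvKey b)) x acc)
      (c0 ++ c1 ++ c2 ++ c3) =
    (c0 ++ xs.filter (fun x => pvKey x = 0)) ++ (c1 ++ xs.filter (fun x => pvKey x = 1)) ++
    (c2 ++ xs.filter (fun x => pvKey x = 2)) ++ (c3 ++ xs.filter (fun x => pvKey x = 3)) := by
  induction xs generalizing c0 c1 c2 c3 with
  | nil => simp
  | cons x xs ih =>
    simp only [List.foldl_cons]
    rcases pvKey_mem x with hk | hk | hk | hk
    · have step : PySem.List.insertBy (fun a b => decide (pvKey a < pvKey b)) x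
          (c0 ++ c1 ++ c2 ++ c3) = (c0 ++ [x]) ++ c1 ++ c2 ++ c3 := by
        rw [show c0 ++ c1 ++ c2 ++ c3 = c0 ++ (c1 ++ (c2 ++ c3)) by simp,
          insertBy_append_left _ _ _ _ (fun y hy => by simp [h0 y hy, hk]),
          insertBy_all_before _ _ _ (fun y hy => by
            simp only [List.mem_append] at hy
            rcases hy with hy | hy | hy
            · simp [h1 y hy, hk]
            · simp [h2 y hy, hk]
            · simp [h3 y hy, hk])]
        simp
      rw [step, ih (c0 ++ [x]) c1 c2 c3
        (fun y hy => by rcases List.mem_append.mp hy with hy | hy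
                        · exact h0 y hy
                        · simp only [List.mem_singleton] at hy; subst hy; exact hk) h1 h2 h3]
      simp [List.filter_cons, hk]
    · have step : PySem.List.insertBy (fun a b => decide (pvKey a < pvKey b)) x
          (c0 ++ c1 ++ c2 ++ c3) = c0 ++ (c1 ++ [x]) ++ c2 ++ c3 := by
        rw [show c0 ++ c1 ++ c2 ++ c3 = (c0 ++ c1) ++ (c2 ++ c3) by simp,
          insertBy_append_left _ _ _ _ (fun y hy => by
            rcases List.mem_append.mp hy with hy | hy
            · simp [h0 y hy, hk]
            · simp [h1 y hy, hk]),
          insertBy_all_before _ _ _ (fun y hy => by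
            rcases List.mem_append.mp hy with hy | hy
            · simp [h2 y hy, hk]
            · simp [h3 y hy, hk])]
        simp
      rw [step, ih c0 (c1 ++ [x]) c2 c3 h0
        (fun y hy => by rcases List.mem_append.mp hy with hy | hy
                        · exact h1 y hy
                        · simp only [List.mem_singleton] at hy; subst hy; exact hk) h2 h3]
      simp [List.filter_cons, hk]
    · have step : PySem.List.insertBy (fun a b => decide (pvKey a < pvKey b)) x
          (c0 ++ c1 ++ c2 ++ c3) = c0 ++ c1 ++ (c2 ++ [x]) ++ c3 := by
        rw [show c0 ++ c1 ++ c2 ++ c3 = (c0 ++ c1 ++ c2) ++ c3 by simp,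
          insertBy_append_left _ _ _ _ (fun y hy => by
            simp only [List.append_assoc, List.mem_append] at hy
            rcases hy with hy | hy | hy
            · simp [h0 y hy, hk]
            · simp [h1 y hy, hk]
            · simp [h2 y hy, hk]),
          insertBy_all_before _ _ _ (fun y hy => by simp [h3 y hy, hk])]
        simp
      rw [step, ih c0 c1 (c2 ++ [x]) c3 h0 h1
        (fun y hy => by rcases List.mem_append.mp hy with hy | hy
                        · exact h2 y hy
                        · simp only [List.mem_singleton] at hy; subst hy; exact hk) h3]
      simp [List.filter_cons, hk]
    · have step : PySem.List.insertBy (fun a b => decide (pvKey a < pvKey b)) x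
          (c0 ++ c1 ++ c2 ++ c3) = c0 ++ c1 ++ c2 ++ (c3 ++ [x]) := by
        rw [PySem.List.insertBy_of_forall_not_before _ _ _ (fun y hy => by
          simp only [List.append_assoc, List.mem_append] at hy
          rcases hy with hy | hy | hy | hy
          · simp [h0 y hy, hk]
          · simp [h1 y hy, hk]
          · simp [h2 y hy, hk]
          · simp [h3 y hy, hk])]
        simp
      rw [step, ih c0 c1 c2 (c3 ++ [x]) h0 h1 h2
        (fun y hy => by rcases List.mem_append.mp hy with hy | hy
                        · exact h3 y hy
                        · simp only [List.mem_singleton] at hy; subst hy; exact hk)]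
      simp [List.filter_cons, hk]

-- string-concatenation bridges
lemma join_nil_eq (l : List String) : PySem.Str.join "" l = pvSj l := by
  induction l with
  | nil => decide
  | cons a t ih =>
    apply String.toList_injective
    unfold pvSj
    rw [List.foldr_cons, String.toList_append]
    rw [show List.foldr (· ++ ·) "" t = pvSj t from rfl, ← ih]
    cases t <;> simp [PySem.Str.toList_join, PySem.Chars.join, List.intercalate]

lemma sj_append (l1 l2 : List String) : pvSj (l1 ++ l2) = pvSj l1 ++ pvSj l2 := by
  induction l1 with
  | nil => simp [pvSj]
  | cons a t ih =>
    simp only [List.cons_append, pvSj, List.foldr_cons] at ih ⊢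
    rw [ih, String.append_assoc]

lemma foldl_str {α : Type} (f : α → String) (l : List α) (s0 : String) :
    l.foldl (fun s x => s ++ f x) s0 = s0 ++ pvSj (l.map f) := by
  induction l generalizing s0 with
  | nil => simp [pvSj]
  | cons a t ih =>
    simp only [List.foldl_cons, List.map_cons, pvSj, List.foldr_cons] at ih ⊢
    rw [ih, String.append_assoc]

-- A's inline card body is B's card helper
lemma cardA_eq (ins : List (String × String)) :
    (let severity := (PySem.Dict.mk ins).getD "severity" "info"
     let title := (PySem.Dict.mk ins).getD "title" "Insight"
     let description := (PySem.Dict.mk ins).getD "description" ""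
     let recommendation := (PySem.Dict.mk ins).getD "recommendation" ""
     let emoji := (PySem.Dict.mk [("critical", "🚨"), ("warning", "⚠️"), ("info", "ℹ️")]).getD severity "ℹ️"
     let recommendation_html :=
       if recommendation ≠ "" then
         "<div class=\"insight-recommendation\">" ++ recommendation ++ "</div>"
       else ""
     "\n        <div class=\"insight-card " ++ severity ++ "\">\n            <h4>" ++
     emoji ++ " " ++ pyTitle severity ++ ": " ++ title ++ "</h4>\n            <p>" ++
     description ++ "</p>\n            " ++ recommendation_html ++ "\n        </div>\n        ") =
    pvCard ins := by
  simp only [pvCard, pvEmoji_eq]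

-- key-value / severity-string correspondences for the filters
lemma key0_iff (x : List (String × String)) : (pvKey x = 0) ↔ (pvSev x = "critical") := by
  rw [pvKey_eq]; split_ifs with a b c <;> simp_all

lemma key1_iff (x : List (String × String)) : (pvKey x = 1) ↔ (pvSev x = "warning") := by
  rw [pvKey_eq]; split_ifs with a b c <;> simp_all

lemma key2_iff (x : List (String × String)) : (pvKey x = 2) ↔ (pvSev x = "info") := by
  rw [pvKey_eq]; split_ifs with a b c <;> simp_all

lemma key3_iff (x : List (String × String)) :
    (pvKey x = 3) ↔ (¬ pvSev x = "critical" ∧ ¬ pvSev x = "warning" ∧ ¬ pvSev x = "info") := by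
  rw [pvKey_eq]; split_ifs with a b c <;> simp_all

-- B's single pass produces exactly the four severity filters
lemma pvBuckets_aux (xs : List (List (String × String)))
    (b : List (List (String × String)) × List (List (String × String)) ×
         List (List (String × String)) × List (List (String × String))) :
    xs.foldl (fun b ins =>
      let sev := (PySem.Dict.mk ins).getD "severity" "info"
      if sev = "critical" then (b.1 ++ [ins], b.2.1, b.2.2.1, b.2.2.2)
      else if sev = "warning" then (b.1, b.2.1 ++ [ins], b.2.2.1, b.2.2.2)
      else if sev = "info" then (b.1, b.2.1, b.2.2.1 ++ [ins], b.2.2.2)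
      else (b.1, b.2.1, b.2.2.1, b.2.2.2 ++ [ins])) b =
    (b.1 ++ xs.filter (fun x => pvSev x = "critical"),
     b.2.1 ++ xs.filter (fun x => pvSev x = "warning"),
     b.2.2.1 ++ xs.filter (fun x => pvSev x = "info"),
     b.2.2.2 ++ xs.filter (fun x =>
       ¬ pvSev x = "critical" ∧ ¬ pvSev x = "warning" ∧ ¬ pvSev x = "info")) := by
  induction xs generalizing b with
  | nil => simp
  | cons x t ih =>
    by_cases hc : pvSev x = "critical"
    · have hc' : (PySem.Dict.mk x).getD "severity" "info" = "critical" := hc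
      rw [List.foldl_cons, show (let sev := (PySem.Dict.mk x).getD "severity" "info"
          if sev = "critical" then (b.1 ++ [x], b.2.1, b.2.2.1, b.2.2.2)
          else if sev = "warning" then (b.1, b.2.1 ++ [x], b.2.2.1, b.2.2.2)
          else if sev = "info" then (b.1, b.2.1, b.2.2.1 ++ [x], b.2.2.2)
          else (b.1, b.2.1, b.2.2.1, b.2.2.2 ++ [x])) =
          (b.1 ++ [x], b.2.1, b.2.2.1, b.2.2.2) from by simp [hc'], ih]
      simp [List.filter_cons, hc]
    · have hc' : ¬ (PySem.Dict.mk x).getD "severity" "info" = "critical" := hc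
      by_cases hw : pvSev x = "warning"
      · have hw' : (PySem.Dict.mk x).getD "severity" "info" = "warning" := hw
        rw [List.foldl_cons, show (let sev := (PySem.Dict.mk x).getD "severity" "info"
            if sev = "critical" then (b.1 ++ [x], b.2.1, b.2.2.1, b.2.2.2)
            else if sev = "warning" then (b.1, b.2.1 ++ [x], b.2.2.1, b.2.2.2)
            else if sev = "info" then (b.1, b.2.1, b.2.2.1 ++ [x], b.2.2.2)
            else (b.1, b.2.1, b.2.2.1, b.2.2.2 ++ [x])) =
            (b.1, b.2.1 ++ [x], b.2.2.1, b.2.2.2) from by simp [hc', hw'], ih]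
        simp [List.filter_cons, hc, hw]
      · have hw' : ¬ (PySem.Dict.mk x).getD "severity" "info" = "warning" := hw
        by_cases hi : pvSev x = "info"
        · have hi' : (PySem.Dict.mk x).getD "severity" "info" = "info" := hi
          rw [List.foldl_cons, show (let sev := (PySem.Dict.mk x).getD "severity" "info"
              if sev = "critical" then (b.1 ++ [x], b.2.1, b.2.2.1, b.2.2.2)
              else if sev = "warning" then (b.1, b.2.1 ++ [x], b.2.2.1, b.2.2.2)
              else if sev = "info" then (b.1, b.2.1, b.2.2.1 ++ [x], b.2.2.2)
              else (b.1, b.2.1, b.2.2.1, b.2.2.2 ++ [x])) =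
              (b.1, b.2.1, b.2.2.1 ++ [x], b.2.2.2) from by simp [hc', hw', hi'], ih]
          simp [List.filter_cons, hc, hw, hi]
        · have hi' : ¬ (PySem.Dict.mk x).getD "severity" "info" = "info" := hi
          rw [List.foldl_cons, show (let sev := (PySem.Dict.mk x).getD "severity" "info"
              if sev = "critical" then (b.1 ++ [x], b.2.1, b.2.2.1, b.2.2.2)
              else if sev = "warning" then (b.1, b.2.1 ++ [x], b.2.2.1, b.2.2.2)
              else if sev = "info" then (b.1, b.2.1, b.2.2.1 ++ [x], b.2.2.2)
              else (b.1, b.2.1, b.2.2.1, b.2.2.2 ++ [x])) =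
              (b.1, b.2.1, b.2.2.1, b.2.2.2 ++ [x]) from by simp [hc', hw', hi'], ih]
          simp [List.filter_cons, hc, hw, hi]

-- ===== VERDICT (by name: the statement is the Claim_ definition above) =====
theorem get_insights_grid_html_spec : Claim_equal_get_insights_grid_html := by
  intro insights report_style _
  unfold Spec_get_insights_grid_html
  by_cases h : insights = []
  · simp [get_insights_grid_html, get_insights_grid_html_alt, h]
  · unfold get_insights_grid_html get_insights_grid_html_alt
    rw [if_neg h, if_neg h]
    simp only []
    rw [show (fun (x : List (String × String)) =>
        (PySem.Dict.mk [("critical", (0:Int)), ("warning", 1), ("info", 2)]).getD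
          ((PySem.Dict.mk x).getD "severity" "info") 3) = pvKey from rfl]
    rw [PySem.List.sorted_eq_foldl_insertBy]
    rw [show ([] : List (List (String × String))) = [] ++ [] ++ [] ++ [] from rfl]
    rw [sorted_buckets insights [] [] [] [] (by simp) (by simp) (by simp) (by simp)]
    rw [show pvBuckets insights =
      (insights.filter (fun x => pvSev x = "critical"),
       insights.filter (fun x => pvSev x = "warning"),
       insights.filter (fun x => pvSev x = "info"),
       insights.filter (fun x =>
         ¬ pvSev x = "critical" ∧ ¬ pvSev x = "warning" ∧ ¬ pvSev x = "info"))
      from by rw [pvBuckets]; rw [pvBuckets_aux]; simp]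
    rw [List.filter_congr (fun x _ => by simp [key0_iff] : ∀ x ∈ insights,
          (decide (pvKey x = 0)) = (decide (pvSev x = "critical"))),
        List.filter_congr (fun x _ => by simp [key1_iff] : ∀ x ∈ insights,
          (decide (pvKey x = 1)) = (decide (pvSev x = "warning"))),
        List.filter_congr (fun x _ => by simp [key2_iff] : ∀ x ∈ insights,
          (decide (pvKey x = 2)) = (decide (pvSev x = "info"))),
        List.filter_congr (fun x _ => by simp [key3_iff] : ∀ x ∈ insights,
          (decide (pvKey x = 3)) = (decide (¬ pvSev x = "critical" ∧ ¬ pvSev x = "warning" ∧ ¬ pvSev x = "info")))]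
    rw [PySem.List.foldl_append_singleton_eq_map]
    simp only [cardA_eq, List.nil_append]
    rw [join_nil_eq]
    rw [foldl_str, foldl_str, foldl_str, foldl_str]
    simp [sj_append, List.map_append, String.append_assoc]
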